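-- pv_equiv track=rewrite | github.com/filipeparreira/ED2_Codes | AT4/at4.py | pesquisarRegistro
-- ===== SOURCE A (Python) =====
-- def busca_binaria(tabela_indices, chave_busca):
--     inicio = 0
--     fim = len(tabela_indices) - 1
--     chave_busca = chave_busca.upper()
--
--     while inicio <= fim:
--         meio = int((inicio + fim) / 2)
--         valor = tabela_indices[meio][1].upper()
--
--         if valor == chave_busca:
--             return tabela_indices[meio]
--         if valor > chave_busca:
--             fim = meio - 1
--         else:
--             inicio = meio + 1
--
--     return False
--
-- def pesquisarRegistro(chave_busca, idx_primarios, idx_secundarios):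
--     # Pesquisar na tabela de indices secundarios a chave de busca, retornando uma lista de tuplas contendo os resultados
--     # para a busca, foi utilizado uma função da própria linguagem Python3: filter()
--     chave_busca = chave_busca.upper().replace(' ', '')
--     valores_idx_secundarios = list()
--     valores_idx_secundarios = list(filter(lambda x:chave_busca in x[1], idx_secundarios))
--
--     # Verifica se encontrou algum item, caso tenha encontrado (tamanho da lista de tuplas maior que 0),
--     # percorre a lista de valores encontrados na tabela de indices secundarios, e utilizando a CC de cada valor,
--     # realiza-se a busca binaria dentro da tabela de indices primarios, caso encontre ele guarda o rrn dentro da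
--     # lista de RRN's
--     if len(valores_idx_secundarios) > 0:
--         valores_RRN = list()
--         for valor in valores_idx_secundarios:
--             resultado = busca_binaria(idx_primarios, valor[0])
--             if resultado != False:
--                valores_RRN.append(resultado[0])
--         return valores_RRN
--
--     # Caso os valores de retorno da pesquisa dentro do idx_secundario venha vazio, retorna uma lista vazia
--     return list()
-- ===== SOURCE B (Python) =====
-- def _buscar(tabela, chave):
--     # Binary search by halving the list itself (probe index (len-1)//2, recurse on a slice);
--     # probes exactly the elements A's index-bounds loop probes. Returns the RRN or None.
--     if not tabela:
--         return None
--     meio = (len(tabela) - 1) // 2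
--     rrn, valor = tabela[meio]
--     if valor == chave:
--         return rrn
--     if valor > chave:
--         return _buscar(tabela[:meio], chave)
--     return _buscar(tabela[meio + 1:], chave)
--
-- def pesquisarRegistro(chave_busca, idx_primarios, idx_secundarios):
--     # Uppercase the primary index once, then map each secondary entry to an optional RRN
--     # (None when the substring filter rejects it or the search misses) and keep the hits.
--     chave = chave_busca.upper().replace(' ', '')
--     tabela = [(rrn, campo.upper()) for rrn, campo in idx_primarios]
--     def achar(item):
--         cc, campos = item
--         return _buscar(tabela, cc.upper()) if chave in campos else None
--     return [r for r in map(achar, idx_secundarios) if r is not None]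
-- ===== Notes on version B (the rewrite author's own statement) =====
-- stated objective: alternative
-- what changed: B replaces the index-bounds while-loop binary search by structural recursion on list slices (probe element (len-1)//2, recurse on the left or right sublist, same probe sequence as A), uppercases the primary index once instead of inside every probe, and replaces A's filter-then-length-check-then-accumulating-loop by a single map to optional RRNs followed by dropping the Nones.
import Mathlib
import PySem

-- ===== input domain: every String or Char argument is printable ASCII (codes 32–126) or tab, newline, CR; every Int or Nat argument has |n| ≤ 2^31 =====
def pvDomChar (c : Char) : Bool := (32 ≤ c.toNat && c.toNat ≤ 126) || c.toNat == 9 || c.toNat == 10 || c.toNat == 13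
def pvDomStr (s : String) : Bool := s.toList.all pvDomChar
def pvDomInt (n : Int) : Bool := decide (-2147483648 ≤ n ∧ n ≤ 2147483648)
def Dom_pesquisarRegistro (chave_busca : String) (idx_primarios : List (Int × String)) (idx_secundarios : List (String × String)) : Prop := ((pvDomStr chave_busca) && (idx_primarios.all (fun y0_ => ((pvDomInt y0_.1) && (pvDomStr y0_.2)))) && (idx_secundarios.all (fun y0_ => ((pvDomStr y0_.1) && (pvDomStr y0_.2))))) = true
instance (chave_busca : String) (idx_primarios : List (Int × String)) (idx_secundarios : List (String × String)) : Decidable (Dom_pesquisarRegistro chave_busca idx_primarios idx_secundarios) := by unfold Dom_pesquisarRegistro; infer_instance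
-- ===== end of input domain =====

-- B replaces A's index-bounds while-loop binary search by structural recursion on list slices
-- (same probe sequence), uppercases the primary index once, and turns the filter-then-loop
-- phases into map-to-Option + discard-Nones (alternative decomposition); return value proved
-- equal on every input.

-- ===== PORT A =====
-- while-loop of busca_binaria; 'chave' arrives already uppercased (Python uppercases it once
-- before the loop). int((inicio+fim)/2) is ported as Int ediv '/', exact here since every
-- reachable call has 0 ≤ inicio ≤ fim; the pyGet? none branch is unreachable for the same
-- reason (Python never indexes out of range from busca_binaria's initial bounds).
def buscaBinariaGo (tabela : List (Int × String)) (chave : String) (inicio fim : Int) : Option (Int × String) :=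
  if _h : inicio ≤ fim then
    let meio := (inicio + fim) / 2
    match PySem.List.pyGet? tabela meio with
    | none => none
    | some entry =>
      let valor := PySem.Str.upper entry.2
      if valor == chave then some entry
      else if PySem.Chars.strLt chave.toList valor.toList then  -- valor > chave_busca
        buscaBinariaGo tabela chave inicio (meio - 1)
      else
        buscaBinariaGo tabela chave (meio + 1) fim
  else none
termination_by (fim + 1 - inicio).toNat
decreasing_by all_goals omega

-- busca_binaria: returns the tuple, or none for Python's False ('resultado != False' ↔ isSome)
def buscaBinaria (tabela_indices : List (Int × String)) (chave_busca : String) : Option (Int × String) :=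
  buscaBinariaGo tabela_indices (PySem.Str.upper chave_busca) 0 ((tabela_indices.length : Int) - 1)

def pesquisarRegistro (chave_busca : String) (idx_primarios : List (Int × String)) (idx_secundarios : List (String × String)) : List Int :=
  let chave := PySem.Str.replace (PySem.Str.upper chave_busca) " " ""
  let valores_idx_secundarios := idx_secundarios.filter (fun x => PySem.Str.isIn chave x.2)
  if valores_idx_secundarios.length > 0 then
    valores_idx_secundarios.foldl (fun valores_RRN valor =>
      match buscaBinaria idx_primarios valor.1 with
      | some resultado => valores_RRN ++ [resultado.1]
      | none => valores_RRN) []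
  else []

-- ===== PORT B =====
-- _buscar: structural recursion on the list; tabela[meio] with meio = (len-1)//2 < len is
-- getElem?; the Python slices tabela[:meio] and tabela[meio+1:] have nonnegative in-range
-- bounds, so List.take / List.drop are exact for them.
def buscarSlice (tabela : List (Int × String)) (chave : String) : Option Int :=
  if h : tabela.isEmpty then none
  else
    let meio := (tabela.length - 1) / 2
    match tabela[meio]? with
    | none => none
    | some p =>
      if p.2 == chave then some p.1
      else if PySem.Chars.strLt chave.toList p.2.toList then  -- valor > chave
        buscarSlice (tabela.take meio) chave
      else
        buscarSlice (tabela.drop (meio + 1)) chave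
termination_by tabela.length
decreasing_by
  all_goals
    have hlen : tabela.length ≠ 0 := by
      intro h0; exact h (List.isEmpty_iff_length_eq_zero.mpr h0)
    simp only [List.length_take, List.length_drop]
    omega

def pesquisarRegistro_alt (chave_busca : String) (idx_primarios : List (Int × String)) (idx_secundarios : List (String × String)) : List Int :=
  let chave := PySem.Str.replace (PySem.Str.upper chave_busca) " " ""
  let tabela := idx_primarios.map (fun p => (p.1, PySem.Str.upper p.2))
  let achar := fun (item : String × String) =>
    if PySem.Str.isIn chave item.2 then buscarSlice tabela (PySem.Str.upper item.1) else none
  (idx_secundarios.map achar).filterMap id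

-- ===== PRECONDITION & SPEC =====
def Spec_pesquisarRegistro (chave_busca : String) (idx_primarios : List (Int × String)) (idx_secundarios : List (String × String)) (out : List Int) : Prop := out = pesquisarRegistro_alt chave_busca idx_primarios idx_secundarios
instance (chave_busca : String) (idx_primarios : List (Int × String)) (idx_secundarios : List (String × String)) (out : List Int) : Decidable (Spec_pesquisarRegistro chave_busca idx_primarios idx_secundarios out) := by unfold Spec_pesquisarRegistro; infer_instance

-- ===== CLAIM (what is proved, stated in full; the proofs are below) =====
def Claim_equal_pesquisarRegistro : Prop := ∀ (chave_busca : String) (idx_primarios : List (Int × String)) (idx_secundarios : List (String × String)), Dom_pesquisarRegistro chave_busca idx_primarios idx_secundarios → Spec_pesquisarRegistro chave_busca idx_primarios idx_secundarios (pesquisarRegistro chave_busca idx_primarios idx_secundarios)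

-- ===== LEMMAS AND PROOFS =====

-- A's bounded search on [inicio, fim] equals B's slice search on the corresponding segment
-- of the pre-uppercased table: both probe the same element at each step.
theorem go_eq_slice (prim : List (Int × String)) (K : String) :
    ∀ (n : Nat) (inicio fim : Int), (fim + 1 - inicio).toNat = n → 0 ≤ inicio →
      fim < (prim.length : Int) →
      (buscaBinariaGo prim K inicio fim).map Prod.fst
        = buscarSlice (((prim.map (fun p => (p.1, PySem.Str.upper p.2))).drop inicio.toNat).take n) K := by
  intro n
  induction n using Nat.strong_induction_on with
  | _ n ih =>
    intro inicio fim hn h0 hfim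
    by_cases hle : inicio ≤ fim
    · have hn1 : 1 ≤ n := by omega
      have hlen' : (prim.map (fun p => (p.1, PySem.Str.upper p.2))).length = prim.length := by simp
      have hiplus : inicio.toNat + n ≤ prim.length := by omega
      have hseglen : (((prim.map (fun p => (p.1, PySem.Str.upper p.2))).drop inicio.toNat).take n).length = n := by
        simp only [List.length_take, List.length_drop, hlen']; omega
      have hne : ¬ ((((prim.map (fun p => (p.1, PySem.Str.upper p.2))).drop inicio.toNat).take n).isEmpty = true) := by
        intro hemp
        rw [List.isEmpty_iff_length_eq_zero, hseglen] at hemp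
        omega
      rw [buscaBinariaGo, buscarSlice]
      simp only [dif_pos hle, dif_neg hne]
      have hmeio : (inicio + fim) / 2 = ((inicio.toNat + (n - 1) / 2 : Nat) : Int) := by omega
      have hmB : (((((prim.map (fun p => (p.1, PySem.Str.upper p.2))).drop inicio.toNat).take n)).length - 1) / 2 = (n - 1) / 2 := by
        rw [hseglen]
      have hmn : (n - 1) / 2 < n := by omega
      have hgetA : PySem.List.pyGet? prim ((inicio + fim) / 2)
          = prim[inicio.toNat + (n - 1) / 2]? := by
        rw [hmeio, PySem.List.pyGet?_natCast]
      have hgetB : (((prim.map (fun p => (p.1, PySem.Str.upper p.2))).drop inicio.toNat).take n)[(n - 1) / 2]?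
          = (prim[inicio.toNat + (n - 1) / 2]?).map (fun p => (p.1, PySem.Str.upper p.2)) := by
        rw [List.getElem?_take_of_lt hmn, List.getElem?_drop, List.getElem?_map]
      have hidx : inicio.toNat + (n - 1) / 2 < prim.length := by omega
      have hsome : prim[inicio.toNat + (n - 1) / 2]? = some (prim[inicio.toNat + (n - 1) / 2]) :=
        List.getElem?_eq_getElem hidx
      rw [hmB, hgetA, hgetB, hsome]
      simp only [Option.map_some]
      by_cases heq : (PySem.Str.upper (prim[inicio.toNat + (n - 1) / 2]).2 == K) = true
      · simp [heq]
      · simp only [heq, Bool.false_eq_true, if_false]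
        by_cases hlt : PySem.Chars.strLt K.toList (PySem.Str.upper (prim[inicio.toNat + (n - 1) / 2]).2).toList = true
        · simp only [hlt, if_true]
          -- left half: A on [inicio, meio-1], B on the first (n-1)/2 elements
          rw [List.take_take, min_eq_left (by omega : (n - 1) / 2 ≤ n)]
          have := ih ((n - 1) / 2) hmn inicio ((inicio + fim) / 2 - 1) (by omega) h0 (by omega)
          exact this
        · simp only [hlt, Bool.false_eq_true, if_false]
          -- right half
          rw [List.drop_take, List.drop_drop]
          have harg : inicio.toNat + ((n - 1) / 2 + 1) = ((inicio + fim) / 2 + 1).toNat := by omega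
          have := ih (n - ((n - 1) / 2 + 1)) (by omega) ((inicio + fim) / 2 + 1) fim (by omega) (by omega) hfim
          rw [harg]
          exact this
    · have hn0 : n = 0 := by omega
      have hne : (((prim.map (fun p => (p.1, PySem.Str.upper p.2))).drop inicio.toNat).take n).isEmpty = true := by
        rw [hn0]; simp
      rw [buscaBinariaGo, buscarSlice]
      simp only [dif_neg hle, dif_pos hne]
      simp

-- A's accumulating loop over the filtered list, written as a filterMap over the whole list
theorem fold_filter (g : String × String → Option (Int × String)) (P : String × String → Bool) :
    ∀ (sec : List (String × String)) (acc : List Int),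
      (sec.filter P).foldl (fun acc v => match g v with
        | some r => acc ++ [r.1]
        | none => acc) acc
      = acc ++ sec.filterMap (fun x => if P x then (g x).map Prod.fst else none) := by
  intro sec
  induction sec with
  | nil => intro acc; simp
  | cons x rest ih =>
    intro acc
    by_cases hx : P x = true
    · simp only [List.filter_cons, hx, if_true, List.foldl_cons, List.filterMap_cons]
      cases hg : g x with
      | none => simp only [Option.map_none]; exact ih acc
      | some r =>
        simp only [Option.map_some]
        rw [ih (acc ++ [r.1])]; simp
    · simp only [List.filter_cons, hx, Bool.false_eq_true, if_false, List.filterMap_cons]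
      exact ih acc

-- ===== VERDICT (by name: the statement is the Claim_ definition above) =====
theorem pesquisarRegistro_spec : Claim_equal_pesquisarRegistro := by
  intro chave_busca prim sec _hD
  unfold Spec_pesquisarRegistro pesquisarRegistro pesquisarRegistro_alt
  have hsearch : ∀ cc : String,
      (buscaBinaria prim cc).map Prod.fst
        = buscarSlice (prim.map (fun p => (p.1, PySem.Str.upper p.2))) (PySem.Str.upper cc) := by
    intro cc
    unfold buscaBinaria
    have h := go_eq_slice prim (PySem.Str.upper cc) prim.length 0 ((prim.length : Int) - 1)
      (by omega) le_rfl (by omega)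
    have htake : List.take prim.length (List.map (fun p => (p.1, PySem.Str.upper p.2)) prim)
        = List.map (fun p => (p.1, PySem.Str.upper p.2)) prim := List.take_of_length_le (by simp)
    simpa [htake] using h
  have hfm : ∀ chave : String,
      (fun x : String × String => if PySem.Str.isIn chave x.2 then (buscaBinaria prim x.1).map Prod.fst else none)
        = (fun item : String × String =>
            if PySem.Str.isIn chave item.2 then
              buscarSlice (prim.map (fun p => (p.1, PySem.Str.upper p.2))) (PySem.Str.upper item.1)
            else none) := by
    intro chave
    funext x
    simp only [PySem.Str.isIn]
    by_cases hx : PySem.Chars.isIn chave.toList x.2.toList = true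
    · simp only [hx, if_true]; exact hsearch x.1
    · simp [hx]
  rw [List.filterMap_map]
  simp only [Function.comp_def, id]
  split
  · rw [fold_filter (fun v => buscaBinaria prim v.1)
        (fun x => PySem.Str.isIn (PySem.Str.replace (PySem.Str.upper chave_busca) " " "") x.2) sec []]
    rw [hfm]
    rfl
  · next hlen =>
    have h0 : (sec.filter (fun x => PySem.Str.isIn (PySem.Str.replace (PySem.Str.upper chave_busca) " " "") x.2)) = [] := by
      rcases List.eq_nil_or_concat (sec.filter (fun x => PySem.Str.isIn (PySem.Str.replace (PySem.Str.upper chave_busca) " " "") x.2)) with h | ⟨l, a, h⟩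
      · exact h
      · exfalso; apply hlen; rw [h]; simp
    have hall := List.filter_eq_nil_iff.mp h0
    symm
    rw [List.filterMap_eq_nil_iff]
    intro a ha
    have hpa := hall a ha
    simp only [hpa]
    simp
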